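-- pv_equiv track=rewrite | github.com/singhsaurabh-01/orbit | src/orbit/services/places.py | detect_input_type
-- ===== SOURCE A (Python) =====
-- def detect_input_type(text: str) -> str:
--     """
--     Detect if input is likely an address or a place name.
--
--     Args:
--         text: User input text
--
--     Returns:
--         'address' if likely a full address, 'name' if likely a place name
--     """
--     # Split into words for word-boundary matching
--     words = text.lower().split()
--
--     # Street type abbreviations (must be whole words)
--     street_types = {
--         "street", "st", "st.", "avenue", "ave", "ave.", "road", "rd", "rd.",
--         "drive", "dr", "dr.", "lane", "ln", "ln.", "boulevard", "blvd", "blvd.",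
--         "way", "court", "ct", "ct.", "highway", "hwy", "hwy.", "parkway", "pkwy"
--     }
--
--     # Indicators of a full address
--     address_indicators = [
--         # Contains numbers that look like street addresses (first word is a number)
--         any(c.isdigit() for c in text.split()[0]) if text.split() else False,
--         # Contains common address words as whole words
--         any(word in street_types for word in words),
--         # Contains zip code pattern
--         any(len(word) == 5 and word.isdigit() for word in text.split()),
--         # Contains state abbreviation
--         any(word.upper() in [
--             "AL", "AK", "AZ", "AR", "CA", "CO", "CT", "DE", "FL", "GA",
--             "HI", "ID", "IL", "IN", "IA", "KS", "KY", "LA", "ME", "MD",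
--             "MA", "MI", "MN", "MS", "MO", "MT", "NE", "NV", "NH", "NJ",
--             "NM", "NY", "NC", "ND", "OH", "OK", "OR", "PA", "RI", "SC",
--             "SD", "TN", "TX", "UT", "VT", "VA", "WA", "WV", "WI", "WY"
--         ] for word in text.split()),
--     ]
--
--     if any(address_indicators):
--         return "address"
--     return "name"
-- ===== SOURCE B (Python) =====
-- STREET_TYPES = frozenset({
--     "street", "st", "st.", "avenue", "ave", "ave.", "road", "rd", "rd.",
--     "drive", "dr", "dr.", "lane", "ln", "ln.", "boulevard", "blvd", "blvd.",
--     "way", "court", "ct", "ct.", "highway", "hwy", "hwy.", "parkway", "pkwy"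
-- })
--
-- STATES = frozenset({
--     "AL", "AK", "AZ", "AR", "CA", "CO", "CT", "DE", "FL", "GA",
--     "HI", "ID", "IL", "IN", "IA", "KS", "KY", "LA", "ME", "MD",
--     "MA", "MI", "MN", "MS", "MO", "MT", "NE", "NV", "NH", "NJ",
--     "NM", "NY", "NC", "ND", "OH", "OK", "OR", "PA", "RI", "SC",
--     "SD", "TN", "TX", "UT", "VT", "VA", "WA", "WV", "WI", "WY"
-- })
--
--
-- def detect_input_type(text: str) -> str:
--     """Single pass over the words with early return, instead of four scans."""
--     for i, word in enumerate(text.split()):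
--         if ((i == 0 and any(c.isdigit() for c in word))
--                 or word.lower() in STREET_TYPES
--                 or (len(word) == 5 and word.isdigit())
--                 or word.upper() in STATES):
--             return "address"
--     return "name"
-- ===== Notes on version B (the rewrite author's own statement) =====
-- stated objective: simpler
-- what changed: Replaces the four separate full scans and the eagerly-built indicator list with one pass over the enumerated word list that checks all four conditions per word and returns the address verdict at the first hit.
import Mathlib
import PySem

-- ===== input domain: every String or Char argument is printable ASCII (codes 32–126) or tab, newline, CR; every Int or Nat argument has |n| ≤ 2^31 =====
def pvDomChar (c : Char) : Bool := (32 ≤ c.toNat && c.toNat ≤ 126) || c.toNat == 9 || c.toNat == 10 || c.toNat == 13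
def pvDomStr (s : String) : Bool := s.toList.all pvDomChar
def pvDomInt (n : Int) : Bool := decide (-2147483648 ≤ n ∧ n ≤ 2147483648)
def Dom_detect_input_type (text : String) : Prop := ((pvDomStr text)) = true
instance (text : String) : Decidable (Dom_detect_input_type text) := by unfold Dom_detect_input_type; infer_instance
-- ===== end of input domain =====

-- B replaces A's four separate scans and eagerly-built indicator list with one pass over the
-- enumerated word list that returns "address" at the first word satisfying any condition (simpler).

-- shared constant tables (the Python set/list literals)
def pvStreetList : List String :=
  ["street", "st", "st.", "avenue", "ave", "ave.", "road", "rd", "rd.",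
   "drive", "dr", "dr.", "lane", "ln", "ln.", "boulevard", "blvd", "blvd.",
   "way", "court", "ct", "ct.", "highway", "hwy", "hwy.", "parkway", "pkwy"]

def pvStreets : PySem.Set String := PySem.Set.ofList pvStreetList

def pvStateList : List String :=
  ["AL", "AK", "AZ", "AR", "CA", "CO", "CT", "DE", "FL", "GA",
   "HI", "ID", "IL", "IN", "IA", "KS", "KY", "LA", "ME", "MD",
   "MA", "MI", "MN", "MS", "MO", "MT", "NE", "NV", "NH", "NJ",
   "NM", "NY", "NC", "ND", "OH", "OK", "OR", "PA", "RI", "SC",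
   "SD", "TN", "TX", "UT", "VT", "VA", "WA", "WV", "WI", "WY"]

-- ===== PORT A =====
def detect_input_type (text : String) : String :=
  let words := PySem.Str.split₀ (PySem.Str.lower text)
  -- any(c.isdigit() for c in text.split()[0]) if text.split() else False
  let ind1 : Bool :=
    match PySem.Str.split₀ text with
    | [] => false
    | w :: _ => w.toList.any PySem.Chars.isdigit
  -- any(word in street_types for word in words)
  let ind2 : Bool := words.any (fun word => PySem.Set.contains pvStreets word)
  -- any(len(word) == 5 and word.isdigit() for word in text.split())
  let ind3 : Bool := (PySem.Str.split₀ text).any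
      (fun word => (PySem.Str.len word == 5) && PySem.Str.strIsdigit word)
  -- any(word.upper() in [state list] for word in text.split())
  let ind4 : Bool := (PySem.Str.split₀ text).any
      (fun word => pvStateList.contains (PySem.Str.upper word))
  if [ind1, ind2, ind3, ind4].any id then "address" else "name"

-- ===== PORT B =====
def pvStatesSet : PySem.Set String := PySem.Set.ofList pvStateList

-- the body of B's single if: the four conditions checked on one (i, word)
def pvAddrWord (i : Int) (word : String) : Bool :=
  (i == 0 && word.toList.any PySem.Chars.isdigit)
  || PySem.Set.contains pvStreets (PySem.Str.lower word)
  || ((PySem.Str.len word == 5) && PySem.Str.strIsdigit word)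
  || PySem.Set.contains pvStatesSet (PySem.Str.upper word)

-- the for-loop with early return over the enumerated words
def pvScan : List (Int × String) → String
  | [] => "name"
  | (i, word) :: rest => if pvAddrWord i word then "address" else pvScan rest

def detect_input_type_alt (text : String) : String :=
  pvScan (PySem.List.enumerate (PySem.Str.split₀ text))

-- ===== PRECONDITION & SPEC =====
def Spec_detect_input_type (text : String) (out : String) : Prop := out = detect_input_type_alt text
instance (text : String) (out : String) : Decidable (Spec_detect_input_type text out) := by unfold Spec_detect_input_type; infer_instance

-- ===== CLAIM (what is proved, stated in full; the proofs are below) =====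
def Claim_equal_detect_input_type : Prop := ∀ (text : String), Dom_detect_input_type text → Spec_detect_input_type text (detect_input_type text)

-- ===== LEMMAS AND PROOFS =====

theorem pv_notspace (c : Char) (h1 : 33 ≤ c.toNat) (h2 : c.toNat ≤ 126) :
    PySem.Chars.isspace c = false := by
  simp only [PySem.Chars.isspace, Bool.or_eq_false_iff, Bool.and_eq_false_iff,
    decide_eq_false_iff_not]
  omega

theorem pv_isspace_lowerChar (c : Char) :
    PySem.Chars.isspace (PySem.Chars.lowerChar c) = PySem.Chars.isspace c := by
  unfold PySem.Chars.lowerChar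
  split
  · rename_i h
    simp only [PySem.Chars.isupper, Bool.and_eq_true, decide_eq_true_eq,
      Char.le_def, UInt32.le_iff_toNat_le] at h
    have h1 : 65 ≤ c.toNat := h.1
    have h3 : c.toNat ≤ 90 := h.2
    have hv : (c.toNat + 32).isValidChar := Or.inl (by omega)
    have h2 : (Char.ofNat (c.toNat + 32)).toNat = c.toNat + 32 := by
      rw [Char.toNat_ofNat, if_pos hv]
    rw [pv_notspace _ (by omega) (by omega), pv_notspace _ (by omega) (by omega)]
  · rfl

theorem pv_go_lower (s cur : List Char) (accs : List (List Char)) :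
    PySem.Chars.split₀.go (s.map PySem.Chars.lowerChar) (cur.map PySem.Chars.lowerChar)
      (accs.map PySem.Chars.lower)
    = (PySem.Chars.split₀.go s cur accs).map PySem.Chars.lower := by
  induction s generalizing cur accs with
  | nil =>
    simp only [List.map_nil, PySem.Chars.split₀.go, List.isEmpty_map]
    split
    · simp [List.map_reverse]
    · simp [PySem.Chars.lower, List.map_reverse]
  | cons c rest ih =>
    simp only [List.map_cons, PySem.Chars.split₀.go, pv_isspace_lowerChar, List.isEmpty_map]
    split
    · split
      · exact ih [] accs
      · have := ih [] (cur.reverse :: accs)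
        simpa [PySem.Chars.lower, List.map_reverse] using this
    · exact ih (c :: cur) accs

theorem pv_split₀_lower (s : List Char) :
    PySem.Chars.split₀ (PySem.Chars.lower s) = (PySem.Chars.split₀ s).map PySem.Chars.lower := by
  have := pv_go_lower s [] []
  simpa [PySem.Chars.split₀, PySem.Chars.lower] using this

theorem pv_str_split₀_lower (text : String) :
    PySem.Str.split₀ (PySem.Str.lower text)
      = (PySem.Str.split₀ text).map PySem.Str.lower := by
  simp only [PySem.Str.split₀, PySem.Str.lower, String.toList_ofList, pv_split₀_lower,
    List.map_map]
  simp [Function.comp_def, PySem.Str.lower]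

theorem pv_scan_eq (l : List (Int × String)) :
    pvScan l = if l.any (fun p => pvAddrWord p.1 p.2) then "address" else "name" := by
  induction l with
  | nil => rfl
  | cons p rest ih =>
    obtain ⟨i, w⟩ := p
    cases h : pvAddrWord i w
    · simp only [pvScan, h, List.any_cons, Bool.false_or, ih, Bool.false_eq_true, if_false]
    · simp only [pvScan, h, if_true, List.any_cons, Bool.true_or]

-- the per-word condition without the index-0 clause
def pvC (word : String) : Bool :=
  PySem.Set.contains pvStreets (PySem.Str.lower word)
  || ((PySem.Str.len word == 5) && PySem.Str.strIsdigit word)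
  || PySem.Set.contains pvStatesSet (PySem.Str.upper word)

theorem pv_enum_any (l : List String) (k : Int) (hk : 1 ≤ k) :
    (PySem.List.enumerate l k).any (fun p => pvAddrWord p.1 p.2) = l.any pvC := by
  induction l generalizing k with
  | nil => simp [PySem.List.enumerate]
  | cons w rest ih =>
    have hk0 : (k == 0) = false := by simp; omega
    simp only [PySem.List.enumerate, List.any_cons]
    rw [ih (k + 1) (by omega)]
    simp only [pvAddrWord, hk0, Bool.false_and, Bool.false_or, pvC]

set_option maxRecDepth 20000 in
theorem pv_states_eq : pvStatesSet = pvStateList := by decide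

theorem pv_states_set (x : String) :
    PySem.Set.contains pvStatesSet x = pvStateList.contains x := by
  rw [pv_states_eq]
  simp [PySem.Set.contains_eq_listContains]

theorem pv_any_or (l : List String) (f g : String → Bool) :
    l.any (fun x => f x || g x) = (l.any f || l.any g) := by
  induction l with
  | nil => rfl
  | cons a t ih =>
    simp only [List.any_cons, ih]
    cases f a <;> cases g a <;> simp

theorem pv_cond_shuffle (a b c d e f g : Bool) :
    (a || ((b || e) || ((c || f) || (d || g))))
      = ((a || (b || (c || d))) || (e || (f || g))) := by
  cases a <;> cases b <;> cases c <;> cases d <;> cases e <;> cases f <;> cases g <;> rfl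

-- ===== VERDICT (by name: the statement is the Claim_ definition above) =====
theorem detect_input_type_spec : Claim_equal_detect_input_type := by
  intro text _
  show detect_input_type text = detect_input_type_alt text
  unfold detect_input_type detect_input_type_alt
  rw [pv_str_split₀_lower]
  cases hws : PySem.Str.split₀ text with
  | nil => simp [pvScan, PySem.List.enumerate]
  | cons w rest =>
    simp only [List.map_cons, List.any_cons, List.any_map, Function.comp_def,
      PySem.List.enumerate, pv_scan_eq, zero_add, List.any_nil, Bool.or_false, id_eq]
    have hsplit : (rest.any pvC)
        = (rest.any (fun x => PySem.Set.contains pvStreets (PySem.Str.lower x))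
          || (rest.any (fun x => (PySem.Str.len x == 5) && PySem.Str.strIsdigit x)
            || rest.any (fun x => PySem.Set.contains pvStatesSet (PySem.Str.upper x)))) := by
      unfold pvC
      rw [pv_any_or, pv_any_or]
      simp only [Bool.or_assoc]
    simp only [pv_enum_any rest 1 (by omega), hsplit]
    simp only [pvAddrWord, pv_states_set, beq_self_eq_true, Bool.true_and, pv_cond_shuffle]
    simp only [Bool.or_assoc]
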